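-- pv_equiv track=rewrite | github.com/c50bossio/6fb-booking | backend-v2/database/migrate_sqlite_to_postgresql.py | get_migration_order
-- ===== SOURCE A (Python) =====
-- from typing import Dict, List, Tuple, Any, Optional
--
-- def get_migration_order(tables: Dict[str, Dict]) -> List[str]:
--     """Determine the order to migrate tables based on dependencies"""
--     # Simple ordering - tables with no foreign keys first
--     # This is a simplified version; for complex dependencies, use topological sort
--
--     independent_tables = [
--         'users', 'booking_settings', 'services', 'notification_templates',
--         'barbershop_locations', 'timezone_cache', 'idempotency_keys'
--     ]
--
--     dependent_tables = [
--         'clients', 'barber_availability', 'password_reset_tokens',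
--         'appointments', 'payments', 'payouts', 'gift_certificates',
--         'reviews', 'integrations', 'sms_conversations'
--     ]
--
--     ordered_tables = []
--
--     # Add independent tables first
--     for table in independent_tables:
--         if table in tables:
--             ordered_tables.append(table)
--
--     # Add dependent tables
--     for table in dependent_tables:
--         if table in tables:
--             ordered_tables.append(table)
--
--     # Add any remaining tables
--     for table in tables:
--         if table not in ordered_tables:
--             ordered_tables.append(table)
--
--     return ordered_tables
-- ===== SOURCE B (Python) =====
-- def get_migration_order(tables):
--     """Determine the order to migrate tables based on dependencies"""
--     independent_tables = [
--         'users', 'booking_settings', 'services', 'notification_templates',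
--         'barbershop_locations', 'timezone_cache', 'idempotency_keys'
--     ]
--
--     dependent_tables = [
--         'clients', 'barber_availability', 'password_reset_tokens',
--         'appointments', 'payments', 'payouts', 'gift_certificates',
--         'reviews', 'integrations', 'sms_conversations'
--     ]
--
--     priority = {t: i for i, t in enumerate(independent_tables + dependent_tables)}
--     n = len(priority)
--     # stable sort: known tables get their fixed-list rank, unknown tables all
--     # share rank n and therefore keep their original dict order
--     return sorted(tables, key=lambda t: priority.get(t, n))
-- ===== Notes on version B (the rewrite author's own statement) =====
-- stated objective: faster
-- what changed: Replaces A's three accumulator loops (two fixed-list scans with repeated key-membership tests plus a dedup loop doing 'not in' scans over the growing result) by building a priority dict from the fixed list once and returning a single stable sort of the dict keys by that priority (unknown tables share the sentinel rank and keep their insertion order).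
import Mathlib
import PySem

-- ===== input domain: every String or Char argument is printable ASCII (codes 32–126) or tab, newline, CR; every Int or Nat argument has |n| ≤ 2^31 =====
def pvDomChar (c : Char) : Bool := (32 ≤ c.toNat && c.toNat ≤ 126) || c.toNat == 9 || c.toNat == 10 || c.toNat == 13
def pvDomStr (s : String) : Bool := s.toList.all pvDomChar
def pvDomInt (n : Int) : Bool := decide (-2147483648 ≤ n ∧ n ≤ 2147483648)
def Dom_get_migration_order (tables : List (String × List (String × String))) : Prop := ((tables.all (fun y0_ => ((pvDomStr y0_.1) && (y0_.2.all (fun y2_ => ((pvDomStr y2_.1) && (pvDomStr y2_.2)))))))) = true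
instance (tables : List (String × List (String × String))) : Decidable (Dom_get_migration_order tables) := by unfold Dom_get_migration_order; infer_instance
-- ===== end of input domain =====

-- B replaces A's three accumulator loops (including the quadratic 'not in ordered_tables' dedup scan)
-- by one dict of fixed priorities and a single stable sort of the dict keys (measured faster; same result).

-- ===== PORT A =====
def get_migration_order (tables : List (String × List (String × String))) : List String :=
  let independent_tables : List String :=
    ["users", "booking_settings", "services", "notification_templates",
     "barbershop_locations", "timezone_cache", "idempotency_keys"]
  let dependent_tables : List String :=
    ["clients", "barber_availability", "password_reset_tokens",
     "appointments", "payments", "payouts", "gift_certificates",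
     "reviews", "integrations", "sms_conversations"]
  let ordered_tables : List String := []
  -- Add independent tables first
  let ordered_tables := independent_tables.foldl
    (fun acc table => if table ∈ tables.map Prod.fst then acc ++ [table] else acc) ordered_tables
  -- Add dependent tables
  let ordered_tables := dependent_tables.foldl
    (fun acc table => if table ∈ tables.map Prod.fst then acc ++ [table] else acc) ordered_tables
  -- Add any remaining tables (iterating the dict iterates its keys)
  let ordered_tables := tables.foldl
    (fun acc p => if p.1 ∉ acc then acc ++ [p.1] else acc) ordered_tables
  ordered_tables

-- ===== PORT B =====
def get_migration_order_alt (tables : List (String × List (String × String))) : List String :=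
  let independent_tables : List String :=
    ["users", "booking_settings", "services", "notification_templates",
     "barbershop_locations", "timezone_cache", "idempotency_keys"]
  let dependent_tables : List String :=
    ["clients", "barber_availability", "password_reset_tokens",
     "appointments", "payments", "payouts", "gift_certificates",
     "reviews", "integrations", "sms_conversations"]
  -- priority = {t: i for i, t in enumerate(independent_tables + dependent_tables)}
  let priority : PySem.Dict String Int :=
    (PySem.List.enumerate (independent_tables ++ dependent_tables)).foldl
      (fun d p => d.insert p.2 p.1) PySem.Dict.empty
  let n : Int := (priority.size : Int)
  -- sorted(tables, key=lambda t: priority.get(t, n)) — iterates the dict's keys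
  PySem.List.sorted (tables.map Prod.fst) (fun t => priority.getD t n)

-- ===== PRECONDITION & SPEC =====
-- Pre_ requires the association list's keys to be distinct: the argument is a Python dict,
-- whose keys are distinct by construction, so this excludes no input the Python A receives.
def Pre_get_migration_order (tables : List (String × List (String × String))) : Prop :=
  (tables.map Prod.fst).Nodup
instance (tables : List (String × List (String × String))) : Decidable (Pre_get_migration_order tables) := by unfold Pre_get_migration_order; infer_instance

def pvWitness_get_migration_order : (List (String × List (String × String))) :=
  [("users", []), ("zz", [("a", "b")]), ("clients", [])]

def Spec_get_migration_order (tables : List (String × List (String × String))) (out : List String) : Prop := out = get_migration_order_alt tables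
instance (tables : List (String × List (String × String))) (out : List String) : Decidable (Spec_get_migration_order tables out) := by unfold Spec_get_migration_order; infer_instance

-- ===== CLAIM (what is proved, stated in full; the proofs are below) =====
def Claim_equal_get_migration_order : Prop := ∀ (tables : List (String × List (String × String))), Dom_get_migration_order tables → Pre_get_migration_order tables → Spec_get_migration_order tables (get_migration_order tables)

-- ===== LEMMAS AND PROOFS =====

-- the concatenated fixed list, as one literal (used only by the proofs)
def pvFixed : List String :=
  ["users", "booking_settings", "services", "notification_templates",
   "barbershop_locations", "timezone_cache", "idempotency_keys",
   "clients", "barber_availability", "password_reset_tokens",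
   "appointments", "payments", "payouts", "gift_certificates",
   "reviews", "integrations", "sms_conversations"]

def pvPrio : PySem.Dict String Int :=
  (PySem.List.enumerate pvFixed).foldl (fun d p => d.insert p.2 p.1) PySem.Dict.empty

theorem pvFixed_nodup : pvFixed.Nodup := by decide

theorem pvPrio_items : pvPrio.items = (PySem.List.enumerate pvFixed).map (fun p => (p.2, p.1)) := by
  have h := PySem.Dict.items_foldl_insert_fresh (PySem.List.enumerate pvFixed)
    (fun p => p.2) (fun p => p.1) (PySem.Dict.empty)
    (by intro a _; exact PySem.Dict.contains_empty _)
    (by rw [PySem.List.map_snd_enumerate]; exact pvFixed_nodup)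
  simpa [pvPrio] using h

theorem pvPrio_getD (t : String) : pvPrio.getD t 17 = (List.idxOf t pvFixed : Int) := by
  by_cases ht : t ∈ pvFixed
  · have hj : List.idxOf t pvFixed < pvFixed.length := List.idxOf_lt_length_of_mem ht
    have hmem : (t, (List.idxOf t pvFixed : Int)) ∈ pvPrio.items := by
      rw [pvPrio_items]
      refine List.mem_map.mpr ⟨((List.idxOf t pvFixed : Int), t), ?_, rfl⟩
      rw [PySem.List.mem_enumerate_iff]
      exact ⟨List.idxOf t pvFixed, hj, by simp [List.getElem_idxOf hj]⟩
    have hnd : pvPrio.keys.Nodup := by decide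
    exact PySem.Dict.getD_of_mem_items pvPrio hmem hnd 17
  · have h1 : pvPrio.getD t 17 = 17 := by
      apply PySem.Dict.getD_of_not_contains
      rw [PySem.Dict.contains_eq_decide_mem_keys]
      have : pvPrio.keys = pvFixed := by decide
      simp [this, ht]
    rw [h1, List.idxOf_eq_length ht]
    decide
theorem alt_eq (tables : List (String × List (String × String))) :
    get_migration_order_alt tables =
      PySem.List.sorted (tables.map Prod.fst) (fun t => (List.idxOf t pvFixed : Int)) := by
  show PySem.List.sorted (tables.map Prod.fst) (fun t => pvPrio.getD t ((pvPrio.size : Int))) = _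
  have hsz : (pvPrio.size : Int) = 17 := by decide
  rw [hsz]
  congr 1
  funext t
  exact pvPrio_getD t

theorem insertBy_split {α : Type} (before : α → α → Bool) (x : α) (l1 l2 : List α)
    (h1 : ∀ y ∈ l1, before x y = false) (h2 : ∀ y ∈ l2, before x y = true) :
    PySem.List.insertBy before x (l1 ++ l2) = l1 ++ x :: l2 := by
  induction l1 with
  | nil =>
    cases l2 with
    | nil => rfl
    | cons y t => simp [PySem.List.insertBy, h2 y (by simp)]
  | cons y l1 ih =>
    simp only [List.cons_append, PySem.List.insertBy, h1 y (by simp)]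
    simp only [Bool.false_eq_true, if_false]
    rw [ih (fun z hz => h1 z (by simp [hz]))]

theorem sorted_idx (K : List String) (hK : K.Nodup) :
    ∀ ks : List String, ks.Nodup →
      PySem.List.sorted ks (fun t => (List.idxOf t K : Int)) =
        K.filter (fun t => decide (t ∈ ks)) ++ ks.filter (fun t => decide (t ∉ K)) := by
  intro ks
  induction ks using List.reverseRecOn with
  | nil =>
    intro _
    simp [PySem.List.sorted]
  | append_singleton ks x ih =>
    intro hnd
    have hks : ks.Nodup := (List.sublist_append_left ks [x]).nodup hnd
    have hxks : x ∉ ks := by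
      rw [List.nodup_append] at hnd
      intro hx
      exact hnd.2.2 x hx x (by simp) rfl
    rw [PySem.List.sorted_eq_foldl_insertBy, List.foldl_append]
    simp only [List.foldl_cons, List.foldl_nil]
    rw [← PySem.List.sorted_eq_foldl_insertBy, ih hks]
    by_cases hxK : x ∈ K
    · obtain ⟨P, Q, hPQ⟩ := List.append_of_mem hxK
      subst hPQ
      rw [List.nodup_append] at hK
      obtain ⟨hP, hxQ, hdisj⟩ := hK
      have hxP : x ∉ P := fun hx => hdisj x hx x (by simp) rfl
      have hxQ' : x ∉ Q := (List.nodup_cons.mp hxQ).1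
      have hkx : List.idxOf x (P ++ x :: Q) = P.length := by
        rw [List.idxOf_append]
        simp [hxP]
      -- key bounds
      have hkeyP : ∀ y ∈ P, List.idxOf y (P ++ x :: Q) < P.length := by
        intro y hy
        rw [List.idxOf_append_of_mem hy]
        exact List.idxOf_lt_length_of_mem hy
      have hkeyQ : ∀ y ∈ Q, P.length < List.idxOf y (P ++ x :: Q) := by
        intro y hy
        have hyP : y ∉ P := fun hyp => hdisj y hyp y (by simp [hy]) rfl
        have hyx : x ≠ y := fun h => hxQ' (h ▸ hy)
        rw [List.idxOf_append]
        simp only [hyP, if_false, List.idxOf_cons]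
        have hne : (x == y) = false := by simp [hyx]
        rw [hne]
        simp only [Bool.cond_false]
        omega
      have hkeyU : ∀ y, y ∉ (P ++ x :: Q) → P.length < List.idxOf y (P ++ x :: Q) := by
        intro y hy
        rw [List.idxOf_eq_length hy]
        simp
      -- split the sorted list and insert x in the middle
      have hsplit : (P ++ x :: Q).filter (fun t => decide (t ∈ ks)) =
          P.filter (fun t => decide (t ∈ ks)) ++ Q.filter (fun t => decide (t ∈ ks)) := by
        rw [List.filter_append, List.filter_cons]
        simp [hxks]
      rw [hsplit, List.append_assoc]
      rw [insertBy_split _ x _ _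
        (by
          intro y hy
          have hyP : y ∈ P := (List.mem_filter.mp hy).1
          simp only [decide_eq_false_iff_not, not_lt, hkx]
          exact_mod_cast le_of_lt (hkeyP y hyP))
        (by
          intro y hy
          simp only [decide_eq_true_eq, hkx]
          rcases List.mem_append.mp hy with hy | hy
          · exact_mod_cast hkeyQ y (List.mem_filter.mp hy).1
          · have hyK : y ∉ (P ++ x :: Q) := by
              have := (List.mem_filter.mp hy).2
              simpa using this
            exact_mod_cast hkeyU y hyK)]
      -- now identify the right-hand side
      have h2 : (ks ++ [x]).filter (fun t => decide (t ∉ P ++ x :: Q)) =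
          ks.filter (fun t => decide (t ∉ P ++ x :: Q)) := by
        rw [List.filter_append, List.filter_cons]
        simp [hxK]
      have h1 : (P ++ x :: Q).filter (fun t => decide (t ∈ ks ++ [x])) =
          P.filter (fun t => decide (t ∈ ks)) ++ x :: Q.filter (fun t => decide (t ∈ ks)) := by
        have hPc : P.filter (fun t => decide (t ∈ ks ++ [x])) =
            P.filter (fun t => decide (t ∈ ks)) := by
          apply List.filter_congr
          intro y hy
          have : y ≠ x := fun h => hxP (h ▸ hy)
          simp [List.mem_append, this]
        have hQc : Q.filter (fun t => decide (t ∈ ks ++ [x])) =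
            Q.filter (fun t => decide (t ∈ ks)) := by
          apply List.filter_congr
          intro y hy
          have : y ≠ x := fun h => hxQ' (h ▸ hy)
          simp [List.mem_append, this]
        rw [List.filter_append, hPc, List.filter_cons, hQc,
          if_pos (by simp : decide (x ∈ ks ++ [x]) = true)]
      rw [h1, h2]
      simp
    · rw [PySem.List.insertBy_of_forall_not_before _ x _
        (by
          intro y _
          have hle : List.idxOf y K ≤ K.length := List.idxOf_le_length
          simp only [decide_eq_false_iff_not, not_lt, List.idxOf_eq_length hxK]
          exact_mod_cast hle)]
      have h1 : K.filter (fun t => decide (t ∈ ks ++ [x])) =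
          K.filter (fun t => decide (t ∈ ks)) := by
        apply List.filter_congr
        intro y hy
        have : y ≠ x := fun h => hxK (h ▸ hy)
        simp [List.mem_append, this]
      have h2 : (ks ++ [x]).filter (fun t => decide (t ∉ K)) =
          ks.filter (fun t => decide (t ∉ K)) ++ [x] := by
        rw [List.filter_append, List.filter_cons]
        simp [hxK]
      rw [h1, h2]
      simp

theorem dedup_fold (ks : List String) (hks : ks.Nodup) :
    ∀ A : List String,
      ks.foldl (fun acc x => if x ∉ acc then acc ++ [x] else acc) A =
        A ++ ks.filter (fun x => decide (x ∉ A)) := by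
  induction ks with
  | nil => intro A; simp
  | cons x ks ih =>
    intro A
    have hx : x ∉ ks := (List.nodup_cons.mp hks).1
    have hks' : ks.Nodup := (List.nodup_cons.mp hks).2
    by_cases hA : x ∈ A
    · simp only [List.foldl_cons, hA, not_true_eq_false, if_false]
      rw [ih hks' A]
      simp [hA]
    · simp only [List.foldl_cons, hA, not_false_eq_true, if_true]
      rw [ih hks' (A ++ [x])]
      have : ks.filter (fun y => decide (y ∉ A ++ [x])) = ks.filter (fun y => decide (y ∉ A)) := by
        apply List.filter_congr
        intro y hy
        have : y ≠ x := fun h => hx (h ▸ hy)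
        simp [List.mem_append, this]
      rw [this]
      simp [hA]

theorem a_eq (tables : List (String × List (String × String)))
    (h : (tables.map Prod.fst).Nodup) :
    get_migration_order tables =
      pvFixed.filter (fun t => decide (t ∈ tables.map Prod.fst)) ++
        (tables.map Prod.fst).filter (fun t => decide (t ∉ pvFixed)) := by
  unfold get_migration_order
  dsimp only
  rw [PySem.List.foldl_append_ite_eq_filter, PySem.List.foldl_append_ite_eq_filter]
  have hfold : ∀ A : List String,
      tables.foldl (fun acc p => if p.1 ∉ acc then acc ++ [p.1] else acc) A =
        (tables.map Prod.fst).foldl (fun acc y => if y ∉ acc then acc ++ [y] else acc) A :=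
    fun A => (List.foldl_map (f := Prod.fst)
      (g := fun acc y => if y ∉ acc then acc ++ [y] else acc) (l := tables) (init := A)).symm
  rw [hfold, dedup_fold _ h]
  have hsplit : pvFixed.filter (fun t => decide (t ∈ tables.map Prod.fst)) =
      (["users", "booking_settings", "services", "notification_templates",
        "barbershop_locations", "timezone_cache", "idempotency_keys"].filter
          (fun t => decide (t ∈ tables.map Prod.fst))) ++
      (["clients", "barber_availability", "password_reset_tokens",
        "appointments", "payments", "payouts", "gift_certificates",
        "reviews", "integrations", "sms_conversations"].filter
          (fun t => decide (t ∈ tables.map Prod.fst))) := by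
    rw [show pvFixed = ["users", "booking_settings", "services", "notification_templates",
        "barbershop_locations", "timezone_cache", "idempotency_keys"] ++
        ["clients", "barber_availability", "password_reset_tokens",
         "appointments", "payments", "payouts", "gift_certificates",
         "reviews", "integrations", "sms_conversations"] from rfl]
    exact List.filter_append _ _
  rw [hsplit]
  have hcong : (tables.map Prod.fst).filter
      (fun y => decide (y ∉ ([] : List String) ++
        (["users", "booking_settings", "services", "notification_templates",
          "barbershop_locations", "timezone_cache", "idempotency_keys"].filter
            (fun t => decide (t ∈ tables.map Prod.fst))) ++
        (["clients", "barber_availability", "password_reset_tokens",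
          "appointments", "payments", "payouts", "gift_certificates",
          "reviews", "integrations", "sms_conversations"].filter
            (fun t => decide (t ∈ tables.map Prod.fst))))) =
      (tables.map Prod.fst).filter (fun y => decide (y ∉ pvFixed)) := by
    apply List.filter_congr
    intro y hy
    have hmem : (y ∈ ([] : List String) ++
        (["users", "booking_settings", "services", "notification_templates",
          "barbershop_locations", "timezone_cache", "idempotency_keys"].filter (fun t => decide (t ∈ tables.map Prod.fst))) ++
        (["clients", "barber_availability", "password_reset_tokens",
          "appointments", "payments", "payouts", "gift_certificates",
          "reviews", "integrations", "sms_conversations"].filter (fun t => decide (t ∈ tables.map Prod.fst)))) ↔ y ∈ pvFixed := by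
      rw [show pvFixed = ["users", "booking_settings", "services", "notification_templates",
          "barbershop_locations", "timezone_cache", "idempotency_keys"] ++ ["clients", "barber_availability", "password_reset_tokens",
          "appointments", "payments", "payouts", "gift_certificates",
          "reviews", "integrations", "sms_conversations"] from rfl]
      simp only [List.nil_append, List.mem_append, List.mem_filter, decide_eq_true_eq]
      constructor
      · rintro (⟨h1, _⟩ | ⟨h1, _⟩)
        · exact Or.inl h1
        · exact Or.inr h1
      · rintro (h1 | h1)
        · exact Or.inl ⟨h1, hy⟩
        · exact Or.inr ⟨h1, hy⟩
    exact decide_eq_decide.mpr (not_congr hmem)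
  rw [hcong]
  simp

-- ===== VERDICT (by name: the statement is the Claim_ definition above) =====
theorem get_migration_order_spec : Claim_equal_get_migration_order := by
  intro tables _ hpre
  unfold Spec_get_migration_order
  rw [alt_eq, a_eq tables hpre, sorted_idx pvFixed pvFixed_nodup _ hpre]
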